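-- pv_equiv track=rewrite | github.com/GavriilShchedrinJG/PythonClass-Final | prblm26.py | f
-- ===== SOURCE A (Python) =====
-- def f(n, d):
--     x = n * 9
--     z = x
--     k = 1
--     while z % d: #and n!=3:
--         z = z * 10 + x
--         k += 1
--
--     return k, #long(z) / long(d)
-- ===== SOURCE B (Python) =====
-- def f(n, d):
--     # Smallest k with d | 9n*R_k, i.e. d | n*(10^k - 1): gcd-reduce to the
--     # modulus m = |d|/gcd(|d|,|n|), then search the first k with 10^k == 1 (mod m),
--     # testing each candidate independently by square-and-multiply modular
--     # exponentiation (no carried bigint recurrence).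
--     def gcd(a, b):
--         while b:
--             a, b = b, a % b
--         return a
--
--     def powmod(b, e, m):
--         r = 1 % m
--         b %= m
--         while e:
--             if e & 1:
--                 r = r * b % m
--             b = b * b % m
--             e >>= 1
--         return r
--
--     m = abs(d) // gcd(abs(d), abs(n))
--     t = 1 % m
--     k = 1
--     while powmod(10, k, m) != t:
--         k += 1
--     return k,
-- ===== Notes on version B (the rewrite author's own statement) =====
-- stated objective: faster
-- what changed: B gcd-reduces the problem to the modulus m = |d|/gcd(|d|,|n|) and searches the first k with 10^k == 1 (mod m), testing each candidate independently by hand-written square-and-multiply modular exponentiation, instead of A's carried ever-growing bigint recurrence z -> 10z + 9n tested mod d.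
import Mathlib
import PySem

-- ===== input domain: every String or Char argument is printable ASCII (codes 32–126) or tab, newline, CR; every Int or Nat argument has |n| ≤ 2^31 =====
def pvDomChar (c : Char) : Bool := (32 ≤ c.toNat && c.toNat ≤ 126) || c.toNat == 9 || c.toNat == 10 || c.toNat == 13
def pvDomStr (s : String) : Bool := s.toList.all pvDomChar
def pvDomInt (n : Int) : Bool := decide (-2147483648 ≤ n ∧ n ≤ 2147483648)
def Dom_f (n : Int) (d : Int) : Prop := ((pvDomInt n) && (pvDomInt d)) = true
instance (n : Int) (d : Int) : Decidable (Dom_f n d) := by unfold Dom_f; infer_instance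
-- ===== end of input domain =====

-- B gcd-reduces the problem to the modulus m = |d|/gcd(|d|,|n|) and tests each candidate k
-- independently by square-and-multiply modular exponentiation (10^k mod m == 1), instead of
-- carrying A's ever-growing bigint recurrence; intended as faster (per-step cost stays word-sized).


-- ===== PORT A =====
-- 'while z % d:' — structural recursion over fuel |d|; inside Pre_f the first k with
-- d ∣ z_k is the multiplicative order of 10 mod m, which is ≤ |d|, so the fuel is
-- never exhausted on admitted inputs.
def fLoopA (d : Int) (x : Int) : Nat → Int → Int → Int
  | 0, _, k => k
  | fuel + 1, z, k =>
    if PySem.Int.mod z d ≠ 0 then fLoopA d x fuel (z * 10 + x) (k + 1) else k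

def f (n : Int) (d : Int) : List Int :=
  let x := n * 9
  [fLoopA d x d.natAbs x 1]

-- ===== PORT B =====
-- Source B's hand-written Euclid gcd (nonnegative arguments, carried as Nat)
def egcd (a b : Nat) : Nat :=
  if h : b = 0 then a else egcd b (a % b)
termination_by b
decreasing_by exact Nat.mod_lt _ (Nat.pos_of_ne_zero h)

-- Source B's hand-written square-and-multiply 'powmod' loop (state b, e, r)
def powModGo (m : Nat) (b e r : Nat) : Nat :=
  if h : e = 0 then r
  else powModGo m (b * b % m) (e / 2) (if e % 2 = 1 then r * b % m else r)
termination_by e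
decreasing_by exact Nat.div_lt_self (Nat.pos_of_ne_zero h) (by norm_num)

def powMod (b e m : Nat) : Nat := powModGo m (b % m) e (1 % m)

-- 'while powmod(10, k, m) != t: k += 1' — fuel |d| (inside Pre_f the answer is ≤ |d|)
def fLoopB (m t : Nat) : Nat → Nat → Nat
  | 0, k => k
  | fuel + 1, k => if powMod 10 k m ≠ t then fLoopB m t fuel (k + 1) else k

def f_alt (n : Int) (d : Int) : List Int :=
  let m := d.natAbs / egcd d.natAbs n.natAbs
  let t := 1 % m
  [((fLoopB m t d.natAbs 1 : Nat) : Int)]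

-- ===== PRECONDITION & SPEC =====
-- A raises ZeroDivisionError when d = 0 and loops forever when d ∤ n*(10^k - 1) for every k;
-- such a k exists iff gcd(|d|/gcd(|d|,|n|), 10) = 1, and the first such k is ≤ |d|:
-- this is exactly the set of inputs on which A returns.
def Pre_f (n : Int) (d : Int) : Prop :=
  d ≠ 0 ∧ Nat.gcd (d.natAbs / Nat.gcd d.natAbs n.natAbs) 10 = 1
instance (n : Int) (d : Int) : Decidable (Pre_f n d) := by unfold Pre_f; infer_instance
def pvWitness_f : Int × Int := (1, 3)

def Spec_f (n : Int) (d : Int) (out : List Int) : Prop := out = f_alt n d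
instance (n : Int) (d : Int) (out : List Int) : Decidable (Spec_f n d out) := by unfold Spec_f; infer_instance

-- ===== CLAIM (what is proved, stated in full; the proofs are below) =====
def Claim_equal_f : Prop := ∀ (n : Int) (d : Int), Dom_f n d → Pre_f n d → Spec_f n d (f n d)

-- ===== LEMMAS AND PROOFS =====

-- Source B's Euclid loop computes Nat.gcd.
theorem egcd_eq : ∀ (b a : Nat), egcd a b = Nat.gcd a b := by
  intro b
  induction b using Nat.strong_induction_on with
  | _ b ih =>
    intro a
    rw [egcd]
    by_cases h : b = 0
    · simp [h]
    · rw [dif_neg h, ih (a % b) (Nat.mod_lt _ (Nat.pos_of_ne_zero h)) b]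
      rw [Nat.gcd_comm a b, Nat.gcd_rec b a]
      exact (Nat.gcd_comm _ _)

-- the square-and-multiply loop computes (r * b^e) % m (for every m, including m = 0).
theorem powModGo_eq (m : Nat) :
    ∀ (e b r : Nat), powModGo m (b % m) e (r % m) = (r * b ^ e) % m := by
  intro e
  induction e using Nat.strong_induction_on with
  | _ e ih =>
    intro b r
    rw [powModGo]
    by_cases h : e = 0
    · simp [h]
    · rw [dif_neg h]
      have hlt : e / 2 < e := Nat.div_lt_self (Nat.pos_of_ne_zero h) (by norm_num)
      have hbb : b % m * (b % m) % m = b * b % m := by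
        conv_rhs => rw [Nat.mul_mod]
      by_cases hodd : e % 2 = 1
      · rw [if_pos hodd]
        have hrb : r % m * (b % m) % m = r * b % m := by
          conv_rhs => rw [Nat.mul_mod]
        rw [hbb, hrb, ih (e / 2) hlt (b * b) (r * b)]
        have he : e = 2 * (e / 2) + 1 := by omega
        congr 1
        rw [mul_assoc]
        congr 1
        conv_rhs => rw [he]
        rw [pow_succ, pow_mul]
        ring
      · rw [if_neg hodd]
        rw [hbb, ih (e / 2) hlt (b * b) r]
        have he : e = 2 * (e / 2) := by omega
        congr 1
        congr 1
        conv_rhs => rw [he]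
        rw [pow_mul]
        ring
theorem powMod_eq (b e m : Nat) : powMod b e m = b ^ e % m := by
  have := powModGo_eq m e b 1
  simpa [powMod] using this

-- (10:ℤ)^k - 1 is the cast of the natural number 10^k - 1.
theorem pow_sub_one_cast (k : Nat) : ((10:Int) ^ k - 1) = (((10 ^ k - 1 : Nat)) : Int) := by
  have h1 : (1:Nat) ≤ 10 ^ k := Nat.one_le_pow _ _ (by norm_num)
  push_cast [h1]
  ring

-- Key per-candidate equivalence: A's divisibility test at counter k ↔ B's powmod test at k.
theorem key (n d : Int) (hd : d ≠ 0) (k : Nat) :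
    (PySem.Int.mod (n * ((10:Int) ^ k - 1)) d = 0
      ↔ powMod 10 k (d.natAbs / Nat.gcd d.natAbs n.natAbs)
          = 1 % (d.natAbs / Nat.gcd d.natAbs n.natAbs)) := by
  set D := d.natAbs with hD
  set N := n.natAbs with hN
  set g := Nat.gcd D N with hg
  set m := D / g with hm
  have hDpos : 0 < D := Int.natAbs_pos.mpr hd
  have hgpos : 0 < g := Nat.gcd_pos_of_pos_left _ hDpos
  have hgD : g ∣ D := Nat.gcd_dvd_left _ _
  have hgN : g ∣ N := Nat.gcd_dvd_right _ _
  have hDm : D = g * m := (Nat.mul_div_cancel' hgD).symm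
  have hNg : N = g * (N / g) := (Nat.mul_div_cancel' hgN).symm
  have hcop : Nat.Coprime m (N / g) := Nat.coprime_div_gcd_div_gcd hgpos
  set W : Nat := 10 ^ k - 1 with hW
  have h1 : (1:Nat) ≤ 10 ^ k := Nat.one_le_pow _ _ (by norm_num)
  -- step 1: the fmod test is divisibility
  rw [PySem.Int.mod_eq_zero_iff_dvd]
  -- step 2: to natAbs divisibility
  have hstep2 : (d ∣ n * ((10:Int) ^ k - 1)) ↔ D ∣ N * W := by
    rw [pow_sub_one_cast k, ← Int.natAbs_dvd_natAbs, Int.natAbs_mul, Int.natAbs_natCast]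
  rw [hstep2]
  -- step 3: strip the common factor g and use coprimality
  have hstep3 : (D ∣ N * W) ↔ m ∣ W := by
    constructor
    · intro h
      have h' : g * m ∣ g * ((N / g) * W) := by
        rw [← mul_assoc, ← hNg, ← hDm]; exact h
      have h'' : m ∣ (N / g) * W := (Nat.mul_dvd_mul_iff_left hgpos).mp h'
      exact (Nat.Coprime.dvd_of_dvd_mul_left hcop h'')
    · intro h
      calc D = g * m := hDm
        _ ∣ g * (N / g) * W := by
              rw [mul_assoc]
              exact Nat.mul_dvd_mul_left g (Dvd.dvd.mul_left h _)
        _ = N * W := by rw [← hNg]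
  rw [hstep3]
  -- step 4: divisibility of 10^k - 1 is the powmod test
  rw [powMod_eq]
  constructor
  · intro h
    have : Nat.ModEq m 1 (10 ^ k) := (Nat.modEq_iff_dvd' h1).mpr h
    exact this.symm
  · intro h
    exact (Nat.modEq_iff_dvd' h1).mp (Nat.ModEq.symm h)

-- Lockstep: with equal fuel, A's bigint loop and B's powmod-search loop return the same counter.
theorem lockstep (n d : Int) (hd : d ≠ 0) :
    ∀ (fuel : Nat) (k : Nat),
      fLoopA d (n * 9) fuel (n * ((10:Int) ^ k - 1)) (k : Int)
        = ((fLoopB (d.natAbs / Nat.gcd d.natAbs n.natAbs)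
             (1 % (d.natAbs / Nat.gcd d.natAbs n.natAbs)) fuel k : Nat) : Int) := by
  intro fuel
  induction fuel with
  | zero => intro k; rfl
  | succ m ih =>
    intro k
    show (if PySem.Int.mod (n * ((10:Int) ^ k - 1)) d ≠ 0 then
            fLoopA d (n * 9) m (n * ((10:Int) ^ k - 1) * 10 + n * 9) ((k : Int) + 1) else (k : Int))
        = _
    show _ = ((if powMod 10 k (d.natAbs / Nat.gcd d.natAbs n.natAbs)
                  ≠ 1 % (d.natAbs / Nat.gcd d.natAbs n.natAbs)
               then fLoopB _ _ m (k + 1) else k : Nat) : Int)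
    have hk := key n d hd k
    by_cases hz : PySem.Int.mod (n * ((10:Int) ^ k - 1)) d = 0
    · rw [if_neg (by simpa using hz), if_neg (by simpa using hk.mp hz)]
    · have hb : powMod 10 k (d.natAbs / Nat.gcd d.natAbs n.natAbs)
          ≠ 1 % (d.natAbs / Nat.gcd d.natAbs n.natAbs) := fun h => hz (hk.mpr h)
      rw [if_pos hz, if_pos hb]
      have hz' : n * ((10:Int) ^ k - 1) * 10 + n * 9 = n * ((10:Int) ^ (k + 1) - 1) := by
        rw [pow_succ]; ring
      have hk' : ((k : Int) + 1) = ((k + 1 : Nat) : Int) := by push_cast; ring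
      rw [hz', hk', ih (k + 1)]

-- ===== VERDICT (by name: the statement is the Claim_ definition above) =====
theorem f_spec : Claim_equal_f := by
  intro n d _ hpre
  show f n d = f_alt n d
  unfold f f_alt
  simp only [egcd_eq]
  have h := lockstep n d hpre.1 d.natAbs 1
  have h1 : n * ((10:Int) ^ (1:Nat) - 1) = n * 9 := by norm_num
  rw [h1] at h
  simpa using h
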